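-- pv_equiv track=rewrite | github.com/checkjunghyeon/programmers_Python | 프로그래머스/3/12938. 최고의 집합/최고의 집합.py | solution
-- ===== SOURCE A (Python) =====
-- def solution(n, s):
--     answer = []
--     if s//n == 0:
--         return [-1]
--
--     while n >= 1:
--         rem = s//n
--         answer.append(rem)
--         s = s-rem
--         n = n-1
--     return answer
-- ===== SOURCE B (Python) =====
-- def solution(n, s):
--     q, r = divmod(s, n)
--     if q == 0:
--         return [-1]
--     return [q] * (n - r) + [q + 1] * r
-- ===== Notes on version B (the rewrite author's own statement) =====
-- stated objective: simpler
-- what changed: Replaces the while loop of n repeated floor divisions with a single divmod and a closed-form construction [q]*(n-r)+[q+1]*r.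
import Mathlib
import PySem

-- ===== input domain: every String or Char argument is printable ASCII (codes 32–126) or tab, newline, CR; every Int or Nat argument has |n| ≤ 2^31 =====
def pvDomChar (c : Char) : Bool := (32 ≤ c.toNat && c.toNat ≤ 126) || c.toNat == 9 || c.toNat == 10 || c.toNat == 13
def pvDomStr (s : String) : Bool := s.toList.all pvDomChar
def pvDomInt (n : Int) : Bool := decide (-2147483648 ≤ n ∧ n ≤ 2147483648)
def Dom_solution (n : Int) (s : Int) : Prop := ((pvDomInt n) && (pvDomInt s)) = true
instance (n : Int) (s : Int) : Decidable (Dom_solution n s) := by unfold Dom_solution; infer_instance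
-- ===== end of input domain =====

-- B replaces A's while loop of repeated floor divisions with one divmod and a
-- closed-form construction [q]*(n-r)+[q+1]*r (objective: simpler).


-- ===== PORT A =====
-- the 'while n >= 1' loop of A, state (n, s, answer)
def solutionLoop (n : Int) (s : Int) (answer : List Int) : List Int :=
  if h : 1 ≤ n then
    let rem := PySem.Int.floordiv s n
    solutionLoop (n - 1) (s - rem) (answer ++ [rem])
  else answer
termination_by n.toNat
decreasing_by omega

def solution (n : Int) (s : Int) : List Int :=
  if PySem.Int.floordiv s n = 0 then [-1]
  else solutionLoop n s []

-- ===== PORT B =====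
def solution_alt (n : Int) (s : Int) : List Int :=
  let q := PySem.Int.floordiv s n
  let r := PySem.Int.mod s n
  if q = 0 then [-1]
  else List.replicate (n - r).toNat q ++ List.replicate r.toNat (q + 1)

-- ===== PRECONDITION & SPEC =====
-- Pre_ excludes only n = 0, where Python's s//n raises ZeroDivisionError.
def Pre_solution (n : Int) (s : Int) : Prop := n ≠ 0
instance (n : Int) (s : Int) : Decidable (Pre_solution n s) := by unfold Pre_solution; infer_instance
def pvWitness_solution : Int × Int := (3, 14)

def Spec_solution (n : Int) (s : Int) (out : List Int) : Prop := out = solution_alt n s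
instance (n : Int) (s : Int) (out : List Int) : Decidable (Spec_solution n s out) := by unfold Spec_solution; infer_instance

-- ===== CLAIM (what is proved, stated in full; the proofs are below) =====
def Claim_equal_solution : Prop := ∀ (n : Int) (s : Int), Dom_solution n s → Pre_solution n s → Spec_solution n s (solution n s)

-- ===== LEMMAS AND PROOFS =====


-- uniqueness of quotient/remainder with bounded remainders
theorem quot_rem_unique (a b n r r' : Int) (hn : 1 ≤ n)
    (h : (a - b) * n = r - r') (hr : 0 ≤ r) (hrn : r < n) (hr' : 0 ≤ r') (hrn' : r' < n) :
    a = b ∧ r = r' := by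
  have hdvd : n ∣ (r - r') := ⟨a - b, by linarith [h, mul_comm (a - b) n]⟩
  have h0 : r - r' = 0 := Int.eq_zero_of_abs_lt_dvd hdvd (by rw [abs_lt]; omega)
  have hab : (a - b) * n = 0 := by omega
  rcases mul_eq_zero.mp hab with h1 | h1
  · constructor <;> omega
  · omega

-- characterisation of A's loop for positive n
theorem solutionLoop_eq (k : Nat) : ∀ (n s : Int) (acc : List Int), n.toNat = k → 1 ≤ n →
    solutionLoop n s acc =
      acc ++ List.replicate (n - PySem.Int.mod s n).toNat (PySem.Int.floordiv s n)
          ++ List.replicate (PySem.Int.mod s n).toNat (PySem.Int.floordiv s n + 1) := by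
  induction k with
  | zero => intro n s acc hk hn; omega
  | succ k ih =>
    intro n s acc hk hn
    rw [solutionLoop]
    simp only [hn, dif_pos]
    set q := PySem.Int.floordiv s n with hq
    set r := PySem.Int.mod s n with hr
    have hqr : q * n + r = s := PySem.Int.floordiv_mul_add_mod s n
    have hr0 : 0 ≤ r := PySem.Int.mod_nonneg s (by omega)
    have hrn : r < n := PySem.Int.mod_lt s (by omega)
    by_cases h1 : n = 1
    · subst h1
      rw [solutionLoop]
      have : ¬ (1 ≤ (1:Int) - 1) := by omega
      simp only [this]
      have hr1 : r = 0 := by omega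
      have hq1 : q = s := by omega
      simp [hr1, hq1]
    · -- n ≥ 2: recursive step
      have hn1 : 1 ≤ n - 1 := by omega
      rw [ih (n-1) (s - q) _ (by omega) hn1]
      set q' := PySem.Int.floordiv (s - q) (n - 1) with hq'
      set r' := PySem.Int.mod (s - q) (n - 1) with hr'
      have hqr' : q' * (n-1) + r' = s - q := PySem.Int.floordiv_mul_add_mod (s - q) (n - 1)
      have hr0' : 0 ≤ r' := PySem.Int.mod_nonneg _ (by omega)
      have hrn' : r' < n - 1 := PySem.Int.mod_lt _ (by omega)
      have hd : (q' - (q + 1)) * (n - 1) = (r - (n - 1)) - (r' - 0) := by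
        linear_combination hqr' - hqr
      by_cases hcase : r = n - 1
      · -- remainder absorbed: s - q = (q+1)(n-1)
        have hd2 : (q' - (q + 1)) * (n - 1) = 0 - r' := by rw [hcase] at hd; linarith
        obtain ⟨hq'v, hr'v⟩ := quot_rem_unique q' (q + 1) (n - 1) 0 r' hn1
          hd2 le_rfl (by omega) hr0' hrn'
        have h1 : (n - r).toNat = 1 := by omega
        have h2 : r.toNat = (n - 1).toNat := by omega
        simp [hq'v, ← hr'v, h1, h2, List.append_assoc]
      · -- r ≤ n - 2: quotient unchanged
        obtain ⟨hq'v, hr'v⟩ := quot_rem_unique q' q (n - 1) r r' hn1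
          (by linear_combination hd) (by omega) (by omega) (by omega) (by omega)
        have h1 : (n - r).toNat = (n - 1 - r).toNat + 1 := by omega
        simp [hq'v, ← hr'v, h1, List.replicate_succ, List.append_assoc]

theorem solutionLoop_nonpos (n s : Int) (h : ¬ 1 ≤ n) : solutionLoop n s [] = [] := by
  rw [solutionLoop]; simp [h]

-- ===== VERDICT (by name: the statement is the Claim_ definition above) =====
theorem solution_spec : Claim_equal_solution := by
  intro n s _ hpre
  unfold Pre_solution at hpre
  unfold Spec_solution solution solution_alt
  by_cases hq : PySem.Int.floordiv s n = 0
  · simp [hq]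
  · simp only [hq, if_false]
    by_cases hn : 1 ≤ n
    · exact solutionLoop_eq n.toNat n s [] rfl hn
    · rw [solutionLoop_nonpos n s hn]
      have hneg : n < 0 := by omega
      obtain ⟨hb1, hb2⟩ := PySem.Int.mod_neg_bounds s hneg
      have h1 : (n - PySem.Int.mod s n).toNat = 0 := Int.toNat_eq_zero.mpr (by linarith)
      have h2 : (PySem.Int.mod s n).toNat = 0 := Int.toNat_eq_zero.mpr (by linarith)
      simp [h1, h2]
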